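-- pv_equiv track=rewrite | github.com/ventus550/university | python/lista-12/z2-3.py | PNF
-- ===== SOURCE A (Python) =====
-- def PNF(w):
--     res = ''
--     k = 0
--     D = {}
--     for x in w:
--         if x not in D:
--             k += 1
--             D[x] = k
--         res += str(D[x]) + '-'
--     return res[:-1]
-- ===== SOURCE B (Python) =====
-- def PNF(w):
--     # The id of a symbol x is the number of distinct symbols in the prefix of w
--     # up to and including x's first occurrence: compute it directly per position,
--     # with no relabeling table and no counter at all.
--     return '-'.join(str(len(set(w[:w.index(x) + 1]))) for x in w)
-- ===== Notes on version B (the rewrite author's own statement) =====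
-- stated objective: simpler
-- what changed: Replaces A's stateful fused loop (incremental dict + counter + string concatenation) with a stateless closed-form characterization: the id of each symbol is the number of distinct symbols in the prefix up to its first occurrence, computed per position with index/slice/set and joined.
import Mathlib
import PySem

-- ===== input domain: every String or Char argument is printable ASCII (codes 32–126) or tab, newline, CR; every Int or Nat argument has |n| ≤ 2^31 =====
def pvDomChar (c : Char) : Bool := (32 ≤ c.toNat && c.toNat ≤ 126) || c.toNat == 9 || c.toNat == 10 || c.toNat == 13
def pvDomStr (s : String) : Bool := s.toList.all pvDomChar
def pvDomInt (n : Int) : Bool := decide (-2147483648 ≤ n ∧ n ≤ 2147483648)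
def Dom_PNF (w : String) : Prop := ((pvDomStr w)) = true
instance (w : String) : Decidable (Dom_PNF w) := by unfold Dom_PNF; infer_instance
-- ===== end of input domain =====

-- B replaces A's stateful fused loop with a stateless per-position closed form: each symbol's id is the distinct-count of the prefix through its first occurrence (simpler one-liner; return value only).


-- ===== PORT A =====
-- A's loop body: 'if x not in D: k += 1; D[x] = k' then 'res += str(D[x]) + "-"'
def pnfStepA (st : List Char × Int × PySem.Dict Char Int) (x : Char) :
    List Char × Int × PySem.Dict Char Int :=
  let kD := if st.2.2.contains x = false then (st.2.1 + 1, st.2.2.insert x (st.2.1 + 1))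
            else (st.2.1, st.2.2)
  (st.1 ++ (PySem.Int.toStr (kD.2.getD x 0)).toList ++ ['-'], kD.1, kD.2)

def PNF (w : String) : String :=
  let st := w.toList.foldl pnfStepA ([], 0, PySem.Dict.empty)
  String.ofList (PySem.List.slice st.1 none (some (-1)))   -- res[:-1]

-- ===== PORT B =====
-- Source B: str(len(set(w[:w.index(x) + 1]))) for each x, joined with '-'
def pnfIdB (w : List Char) (x : Char) : List Char :=
  (PySem.Int.toStr (PySem.Set.len
    (PySem.Set.ofList (PySem.List.slice w none
      (some (((PySem.List.index? w x).getD 0 : Nat) + 1)))))).toList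

def PNF_alt (w : String) : String :=
  String.ofList (PySem.Chars.join ['-'] (w.toList.map (pnfIdB w.toList)))

-- ===== PRECONDITION & SPEC =====
def Spec_PNF (w : String) (out : String) : Prop := out = PNF_alt w
instance (w : String) (out : String) : Decidable (Spec_PNF w out) := by unfold Spec_PNF; infer_instance

-- ===== CLAIM (what is proved, stated in full; the proofs are below) =====
def Claim_equal_PNF : Prop := ∀ (w : String), Dom_PNF w → Spec_PNF w (PNF w)

-- ===== LEMMAS AND PROOFS =====

-- proof-only helper: the first-occurrence id table A maintains, as a standalone fold
def pnfStepD (D : PySem.Dict Char Int) (x : Char) : PySem.Dict Char Int :=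
  if D.contains x = false then D.insert x ((D.size : Int) + 1) else D

-- once a key is in the dict, later pnfStepD steps never change its value
theorem pnf_getD_foldl_of_contains (l : List Char) (d : PySem.Dict Char Int) (x : Char)
    (h : d.contains x = true) (v : Int) :
    (l.foldl pnfStepD d).getD x v = d.getD x v := by
  induction l generalizing d with
  | nil => rfl
  | cons y l ih =>
    rw [List.foldl_cons]
    by_cases hy : d.contains y = false
    · have hxy : x ≠ y := by intro e; rw [e] at h; rw [h] at hy; exact absurd hy (by simp)
      have hstep : pnfStepD d y = d.insert y ((d.size : Int) + 1) := by
        unfold pnfStepD; rw [if_pos hy]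
      rw [hstep, ih _ (by rw [PySem.Dict.contains_insert]; simp [h]),
        PySem.Dict.getD_insert_of_ne _ _ _ hxy]
    · have hstep : pnfStepD d y = d := by unfold pnfStepD; rw [if_neg hy]
      rw [hstep, ih _ h]

-- A's loop state, started at (res, |d|, d), is the id table plus the emitted pieces read off the FINAL dict
theorem pnf_inv (l : List Char) (res : List Char) (k : Int) (d : PySem.Dict Char Int)
    (hk : k = (d.size : Int)) :
    l.foldl pnfStepA (res, k, d) =
      (res ++ (l.map (fun x =>
          (PySem.Int.toStr ((l.foldl pnfStepD d).getD x 0)).toList ++ ['-'])).flatten,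
       ((l.foldl pnfStepD d).size : Int), l.foldl pnfStepD d) := by
  induction l generalizing res k d with
  | nil => simp [hk]
  | cons x l ih =>
    simp only [List.foldl_cons, List.map_cons, List.flatten_cons]
    by_cases hx : d.contains x = false
    · have hstepA : pnfStepA (res, k, d) x =
          (res ++ (PySem.Int.toStr (k + 1)).toList ++ ['-'], k + 1, d.insert x (k + 1)) := by
        unfold pnfStepA
        simp [hx, PySem.Dict.getD_insert_self]
      have hstepD : pnfStepD d x = d.insert x (k + 1) := by
        unfold pnfStepD; rw [if_pos hx, hk]
      have hk' : k + 1 = ((d.insert x (k + 1)).size : Int) := by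
        rw [PySem.Dict.size_insert, if_neg (by simp [hx]), hk]; push_cast; ring
      rw [hstepA, ih _ _ _ hk', hstepD]
      have hval : (l.foldl pnfStepD (d.insert x (k + 1))).getD x 0 = k + 1 := by
        rw [pnf_getD_foldl_of_contains _ _ _ (PySem.Dict.contains_insert_self _ _ _),
          PySem.Dict.getD_insert_self]
      rw [hval]; simp
    · have hx' : d.contains x = true := by revert hx; cases h : d.contains x <;> simp
      have hstepA : pnfStepA (res, k, d) x =
          (res ++ (PySem.Int.toStr (d.getD x 0)).toList ++ ['-'], k, d) := by
        unfold pnfStepA; simp [hx']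
      have hstepD : pnfStepD d x = d := by unfold pnfStepD; simp [hx']
      rw [hstepA, ih _ _ _ hk, hstepD]
      rw [pnf_getD_foldl_of_contains _ _ _ hx']
      simp

-- dropLast of the '-'-terminated pieces is exactly '-'.join of the pieces
theorem pnf_dropLast_flatten (g : Char → List Char) (l : List Char) :
    (l.map (fun x => g x ++ ['-'])).flatten.dropLast = PySem.Chars.join ['-'] (l.map g) := by
  induction l with
  | nil => simp [PySem.Chars.join_nil]
  | cons x l ih =>
    cases l with
    | nil => simp [PySem.Chars.join_singleton]
    | cons y l' =>
      simp only [List.map_cons, List.flatten_cons] at ih ⊢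
      rw [PySem.Chars.join_cons_cons]
      have hne : (g y ++ ['-']) ++ ((l'.map (fun x => g x ++ ['-'])).flatten) ≠ [] := by
        simp
      rw [List.dropLast_append_of_ne_nil hne, ih]

theorem pnfStepD_not_contains (d : PySem.Dict Char Int) (x : Char)
    (h : d.contains x = false) :
    pnfStepD d x = d.insert x ((d.size : Int) + 1) := by
  unfold pnfStepD; rw [if_pos h]

theorem pnfStepD_contains (d : PySem.Dict Char Int) (x : Char)
    (h : d.contains x = true) : pnfStepD d x = d := by
  unfold pnfStepD; rw [h]; simp

-- which keys the fold has, and how many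
theorem pnf_contains_foldl (l : List Char) (d : PySem.Dict Char Int) (y : Char) :
    (l.foldl pnfStepD d).contains y = (d.contains y || decide (y ∈ l)) := by
  induction l generalizing d with
  | nil => simp
  | cons x l ih =>
    rw [List.foldl_cons, ih]
    by_cases hx : d.contains x = false
    · have : pnfStepD d x = d.insert x ((d.size : Int) + 1) := by unfold pnfStepD; rw [if_pos hx]
      rw [this, PySem.Dict.contains_insert]
      by_cases hyx : y = x
      · simp [hyx]
      · have hb : (y == x) = false := beq_eq_false_iff_ne.mpr hyx
        simp [hb, hyx]
    · have : pnfStepD d x = d := by unfold pnfStepD; rw [if_neg hx]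
      rw [this]
      have hx' : d.contains x = true := by revert hx; cases h : d.contains x <;> simp
      by_cases hyx : y = x
      · simp [hyx, hx']
      · simp [hyx]

theorem pnf_size_foldl (p : List Char) :
    (p.foldl pnfStepD PySem.Dict.empty).size = (PySem.Set.ofList p).length := by
  induction p using List.reverseRecOn with
  | nil => simp [PySem.Dict.size_empty]
  | append_singleton p x ih =>
    rw [List.foldl_append, List.foldl_cons, List.foldl_nil]
    rw [PySem.Set.ofList_eq_foldl, List.foldl_append, List.foldl_cons, List.foldl_nil,
      ← PySem.Set.ofList_eq_foldl]
    by_cases hx : x ∈ p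
    · have hc : (p.foldl pnfStepD PySem.Dict.empty).contains x = true := by
        rw [pnf_contains_foldl]; simp [hx]
      have hs : PySem.Set.add (PySem.Set.ofList p) x = PySem.Set.ofList p := by
        unfold PySem.Set.add
        rw [if_pos (by rw [PySem.Set.contains_iff, PySem.Set.mem_ofList]; exact hx)]
      rw [pnfStepD_contains _ _ hc, hs, ih]
    · have hc : (p.foldl pnfStepD PySem.Dict.empty).contains x = false := by
        rw [pnf_contains_foldl]; simp [hx, PySem.Dict.contains_empty]
      have hs : PySem.Set.add (PySem.Set.ofList p) x = PySem.Set.ofList p ++ [x] := by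
        unfold PySem.Set.add
        rw [if_neg (by rw [PySem.Set.contains_iff, PySem.Set.mem_ofList]; simp [hx])]
      rw [pnfStepD_not_contains _ _ hc, hs]
      simp [PySem.Dict.size_insert, hc, ih]

-- the table value of x is B's closed form: distinct-count of the prefix through x's first occurrence
theorem pnf_getD_eq_idB (w : List Char) (x : Char) (hx : x ∈ w) :
    (PySem.Int.toStr ((w.foldl pnfStepD PySem.Dict.empty).getD x 0)).toList = pnfIdB w x := by
  have hsome : (PySem.List.index? w x).isSome := by
    rw [PySem.List.index?_isSome_iff]; exact hx
  obtain ⟨k, hk⟩ := Option.isSome_iff_exists.mp hsome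
  obtain ⟨pre, suf, hw, hlen, hpre⟩ := (PySem.List.index?_eq_some_iff _ _ _).mp hk
  -- LHS value
  have hsplit : w = (pre ++ [x]) ++ suf := by rw [hw]; simp
  have hcpre : (pre.foldl pnfStepD PySem.Dict.empty).contains x = false := by
    rw [pnf_contains_foldl]; simp [hpre, PySem.Dict.contains_empty]
  have hstep := pnfStepD_not_contains _ x hcpre
  have hval : (w.foldl pnfStepD PySem.Dict.empty).getD x 0 =
      ((pre.foldl pnfStepD PySem.Dict.empty).size : Int) + 1 := by
    rw [hsplit, List.foldl_append, List.foldl_append, List.foldl_cons, List.foldl_nil, hstep,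
      pnf_getD_foldl_of_contains _ _ _ (PySem.Dict.contains_insert_self _ _ _),
      PySem.Dict.getD_insert_self]
  -- RHS value
  have htake : PySem.List.slice w none (some ((k : Int) + 1)) = pre ++ [x] := by
    have : ((k : Int) + 1) = ((k + 1 : Nat) : Int) := by push_cast; ring
    rw [this, PySem.List.slice_to_natCast, hw, ← hlen]
    rw [show pre.length + 1 = pre.length + 1 from rfl, List.take_append]
    simp
  have hset : PySem.Set.ofList (pre ++ [x]) = PySem.Set.ofList pre ++ [x] := by
    rw [PySem.Set.ofList_eq_foldl, List.foldl_append, List.foldl_cons, List.foldl_nil,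
      ← PySem.Set.ofList_eq_foldl]
    unfold PySem.Set.add
    rw [if_neg (by rw [PySem.Set.contains_iff, PySem.Set.mem_ofList]; simp [hpre])]
  have hlen2 : ((pre.foldl pnfStepD PySem.Dict.empty).size : Int) + 1 =
      PySem.Set.len (PySem.Set.ofList pre ++ [x]) := by
    simp [PySem.Set.len, pnf_size_foldl]
  unfold pnfIdB
  rw [hk]
  simp only [Option.getD_some]
  rw [htake, hset, hval, hlen2]

-- ===== VERDICT (by name: the statement is the Claim_ definition above) =====
theorem PNF_spec : Claim_equal_PNF := by
  intro w _
  unfold Spec_PNF PNF PNF_alt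
  rw [pnf_inv w.toList [] 0 PySem.Dict.empty (by simp [PySem.Dict.size_empty])]
  simp only [PySem.List.slice_to_neg_one, List.nil_append]
  rw [pnf_dropLast_flatten]
  rw [List.map_congr_left (fun x hx => pnf_getD_eq_idB w.toList x hx)]
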